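-- pv_equiv track=rewrite | github.com/ulchap/IGI | task5/task.py | find_sum_between_nonzero
-- ===== SOURCE A (Python) =====
-- def find_sum_between_nonzero(lst):
--     # find indexes
--     first_nonzero = next((i for i, x in enumerate(lst) if x != 0), None)
--     last_nonzero = next((i for i, x in enumerate(lst[::-1]) if x != 0), None)
--     if lst.count(0) == 0:
--         return sum(lst)
--
--     if first_nonzero is None or last_nonzero is None:
--         return 0
--
--     last_nonzero = len(lst) - last_nonzero
--
--     # find sum
--     sublist = lst[first_nonzero+1:last_nonzero]
--     return sum(sublist)
-- ===== SOURCE B (Python) =====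
-- def find_sum_between_nonzero(lst):
--     # One pass: commit a pending buffer at each nonzero after the first nonzero.
--     total = 0
--     result = 0
--     pending = 0
--     started = False
--     saw_zero = False
--     for x in lst:
--         total += x
--         if x == 0:
--             saw_zero = True
--         if started:
--             pending += x
--             if x != 0:
--                 result += pending
--                 pending = 0
--         elif x != 0:
--             started = True
--     if not saw_zero:
--         return total
--     return result
-- ===== Notes on version B (the rewrite author's own statement) =====
-- stated objective: alternative
-- what changed: Replaces A's four separate passes (two enumerate scans, a count, a reverse, a slice+sum) by a single left-to-right fold with a pending/committed buffer; no reversal, slicing or index arithmetic.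
import Mathlib
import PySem

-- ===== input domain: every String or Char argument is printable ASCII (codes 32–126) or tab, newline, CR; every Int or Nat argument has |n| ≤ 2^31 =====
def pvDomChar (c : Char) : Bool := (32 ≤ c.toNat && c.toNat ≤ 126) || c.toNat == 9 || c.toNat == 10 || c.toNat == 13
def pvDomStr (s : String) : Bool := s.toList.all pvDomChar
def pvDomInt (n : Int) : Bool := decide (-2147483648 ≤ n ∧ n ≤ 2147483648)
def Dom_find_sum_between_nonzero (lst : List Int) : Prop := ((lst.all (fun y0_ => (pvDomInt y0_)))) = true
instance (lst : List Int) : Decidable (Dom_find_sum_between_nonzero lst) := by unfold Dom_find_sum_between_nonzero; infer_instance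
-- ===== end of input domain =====

-- B replaces A's four passes (two enumerate scans, count, reverse+slice+sum) by one
-- left-to-right fold with a pending/committed buffer; objective: alternative (same O(n) cost).

-- ===== PORT A =====
-- next((i for i, x in enumerate(lst) if x != 0), None): linear scan with a running index
def pyFirstNonzero (lst : List Int) (i : Int) : Option Int :=
  match lst with
  | [] => none
  | x :: xs => if x ≠ 0 then some i else pyFirstNonzero xs (i + 1)

def find_sum_between_nonzero (lst : List Int) : Int :=
  let first_nonzero := pyFirstNonzero lst 0
  let last_nonzero := pyFirstNonzero lst.reverse 0   -- lst[::-1] is reverse (PySem.List.slice?_none_none_neg_one)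
  if PySem.List.count lst 0 = 0 then lst.sum
  else
    match first_nonzero, last_nonzero with
    | some f, some l =>
        let l' := PySem.List.len lst - l
        (PySem.List.slice lst (some (f + 1)) (some l')).sum
    | _, _ => 0

-- ===== PORT B =====
-- loop body of Source B: state (total, result, pending, started, saw_zero)
def altStep : (Int × Int × Int × Bool × Bool) → Int → (Int × Int × Int × Bool × Bool)
  | (total, result, pending, started, sawZero), x =>
    let total := total + x
    let sawZero := if x = 0 then true else sawZero
    if started then
      let pending := pending + x
      if x ≠ 0 then (total, result + pending, 0, started, sawZero)
      else (total, result, pending, started, sawZero)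
    else if x ≠ 0 then (total, result, pending, true, sawZero)
    else (total, result, pending, started, sawZero)

def find_sum_between_nonzero_alt (lst : List Int) : Int :=
  let s := lst.foldl altStep (0, 0, 0, false, false)
  if ¬ s.2.2.2.2 then s.1 else s.2.1

-- ===== PRECONDITION & SPEC =====
def Spec_find_sum_between_nonzero (lst : List Int) (out : Int) : Prop := out = find_sum_between_nonzero_alt lst
instance (lst : List Int) (out : Int) : Decidable (Spec_find_sum_between_nonzero lst out) := by unfold Spec_find_sum_between_nonzero; infer_instance

-- ===== CLAIM (what is proved, stated in full; the proofs are below) =====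
def Claim_equal_find_sum_between_nonzero : Prop := ∀ (lst : List Int), Dom_find_sum_between_nonzero lst → Spec_find_sum_between_nonzero lst (find_sum_between_nonzero lst)

-- ===== LEMMAS AND PROOFS =====

-- committed result increment / leftover pending of Source B's loop once started
def addRes (p : Int) : List Int → Int
  | [] => 0
  | x :: xs => if x ≠ 0 then p + x + addRes 0 xs else addRes (p + x) xs

def pend (p : Int) : List Int → Int
  | [] => p
  | x :: xs => if x ≠ 0 then pend 0 xs else pend (p + x) xs

theorem alt_total (l : List Int) (st : Int × Int × Int × Bool × Bool) :
    (l.foldl altStep st).1 = st.1 + l.sum := by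
  induction l generalizing st with
  | nil => simp
  | cons x xs ih =>
    obtain ⟨t, r, p, s, z⟩ := st
    simp only [List.foldl_cons, List.sum_cons, altStep]
    split_ifs <;> simp [ih] <;> ring

theorem alt_sawZero (l : List Int) (st : Int × Int × Int × Bool × Bool) :
    (l.foldl altStep st).2.2.2.2 = (st.2.2.2.2 || l.any (· == 0)) := by
  induction l generalizing st with
  | nil => simp
  | cons x xs ih =>
    obtain ⟨t, r, p, s, z⟩ := st
    by_cases hx : x = 0 <;> cases s <;>
      simp [List.foldl_cons, altStep, hx, ih] <;> cases z <;> simp [hx]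

theorem alt_zeros (pre : List Int) (h : ∀ x ∈ pre, x = 0) (t r p : Int) (z : Bool) :
    pre.foldl altStep (t, r, p, false, z) = (t, r, p, false, z || !pre.isEmpty) := by
  induction pre generalizing z with
  | nil => simp
  | cons x xs ih =>
    have hx : x = 0 := h x (by simp)
    simp only [List.foldl_cons, altStep, hx]
    simp [ih (fun y hy => h y (by simp [hy]))]

theorem alt_started (l : List Int) (t r p : Int) (z : Bool) :
    l.foldl altStep (t, r, p, true, z) =
      (t + l.sum, r + addRes p l, pend p l, true, z || l.any (· == 0)) := by
  induction l generalizing t r p z with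
  | nil => simp [addRes, pend]
  | cons x xs ih =>
    by_cases hx : x = 0 <;>
      simp [List.foldl_cons, altStep, addRes, pend, hx, ih] <;>
      refine ⟨by ring, by ring, ?_⟩ <;> cases z <;> simp [hx]

theorem addRes_zeros (suf : List Int) (h : ∀ x ∈ suf, x = 0) (p : Int) : addRes p suf = 0 := by
  induction suf generalizing p with
  | nil => rfl
  | cons x xs ih =>
    have hx : x = 0 := h x (by simp)
    simp [addRes, hx, ih (fun y hy => h y (by simp [hy]))]

theorem addRes_append_zeros (mid suf : List Int) (h : ∀ x ∈ suf, x = 0) (p : Int) :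
    addRes p (mid ++ suf) = addRes p mid := by
  induction mid generalizing p with
  | nil => simp [addRes, addRes_zeros suf h]
  | cons x xs ih => by_cases hx : x = 0 <;> simp [addRes, hx, ih]

theorem addRes_last_nonzero (mid : List Int) (a : Int) (ha : a ≠ 0) (p : Int) :
    addRes p (mid ++ [a]) = p + (mid ++ [a]).sum := by
  induction mid generalizing p with
  | nil => simp [addRes, ha]
  | cons x xs ih =>
    by_cases hx : x = 0 <;> simp [addRes, hx, ih] <;> ring

theorem fn_none (l : List Int) (h : ∀ x ∈ l, x = 0) (i : Int) : pyFirstNonzero l i = none := by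
  induction l generalizing i with
  | nil => rfl
  | cons x xs ih =>
    have hx : x = 0 := h x (by simp)
    simp [pyFirstNonzero, hx, ih (fun y hy => h y (by simp [hy]))]

theorem fn_append (pre : List Int) (a : Int) (t : List Int) (h : ∀ x ∈ pre, x = 0) (ha : a ≠ 0)
    (i : Int) : pyFirstNonzero (pre ++ a :: t) i = some (i + (pre.length : Int)) := by
  induction pre generalizing i with
  | nil => simp [pyFirstNonzero, ha]
  | cons x xs ih =>
    have hx : x = 0 := h x (by simp)
    simp only [List.cons_append, pyFirstNonzero, hx]
    rw [if_neg (by simp), ih (fun y hy => h y (by simp [hy]))]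
    simp; ring

theorem exists_first_decomp (l : List Int) (h : ∃ x ∈ l, x ≠ 0) :
    ∃ pre a rest, l = pre ++ a :: rest ∧ (∀ x ∈ pre, x = 0) ∧ a ≠ 0 := by
  induction l with
  | nil => simp at h
  | cons x xs ih =>
    by_cases hx : x = 0
    · obtain ⟨y, hy, hy0⟩ := h
      have hyx : y ∈ xs := List.mem_of_ne_of_mem (fun he => hy0 (he.trans hx)) hy
      obtain ⟨pre, a, rest, heq, hpre, ha⟩ := ih ⟨y, hyx, hy0⟩
      refine ⟨x :: pre, a, rest, by simp [heq], ?_, ha⟩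
      intro z hz
      rcases List.mem_cons.mp hz with h' | h'
      · exact h'.trans hx
      · exact hpre z h'
    · exact ⟨[], x, xs, rfl, by simp, hx⟩

-- A on a mixed list: first nonzero a, last nonzero b, zero prefix/suffix
theorem A_mixed (pre mid suf : List Int) (a b : Int)
    (hpre : ∀ x ∈ pre, x = 0) (hsuf : ∀ x ∈ suf, x = 0) (ha : a ≠ 0) (hb : b ≠ 0)
    (hc : ¬ PySem.List.count (pre ++ a :: (mid ++ [b] ++ suf)) 0 = 0) :
    find_sum_between_nonzero (pre ++ a :: (mid ++ [b] ++ suf)) = (mid ++ [b]).sum := by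
  have h1 : pyFirstNonzero (pre ++ a :: (mid ++ [b] ++ suf)) 0 = some (0 + (pre.length : Int)) :=
    fn_append pre a _ hpre ha 0
  have h2 : pyFirstNonzero (pre ++ a :: (mid ++ [b] ++ suf)).reverse 0 = some (0 + (suf.reverse.length : Int)) := by
    have hr : (pre ++ a :: (mid ++ [b] ++ suf)).reverse
        = suf.reverse ++ b :: (mid.reverse ++ a :: pre.reverse) := by simp
    rw [hr]; exact fn_append _ b _ (fun x hx => hsuf x (List.mem_reverse.mp hx)) hb 0
  simp only [find_sum_between_nonzero, h1, h2, hc, if_false]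
  have e1 : ((0:Int) + ↑pre.length + 1) = ((pre.length + 1 : Nat) : Int) := by push_cast; ring
  have e2 : PySem.List.len (pre ++ a :: (mid ++ [b] ++ suf)) - ((0:Int) + ↑suf.reverse.length)
      = ((pre.length + 1 + (mid.length + 1) : Nat) : Int) := by
    simp [PySem.List.len_eq]; ring
  rw [e1, e2, PySem.List.slice_natCast]
  have hassoc : pre ++ a :: (mid ++ [b] ++ suf) = (pre ++ [a]) ++ ((mid ++ [b]) ++ suf) := by simp
  have hd : (pre ++ a :: (mid ++ [b] ++ suf)).drop (pre.length + 1) = (mid ++ [b]) ++ suf := by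
    rw [hassoc, show pre.length + 1 = (pre ++ [a]).length by simp, List.drop_left]
  rw [hd, Nat.add_sub_cancel_left, show mid.length + 1 = (mid ++ [b]).length by simp, List.take_left]

-- A when the only nonzeros are contiguous at a: rest after the first nonzero is all zeros
theorem A_onez (pre suf : List Int) (a : Int)
    (hpre : ∀ x ∈ pre, x = 0) (hsuf : ∀ x ∈ suf, x = 0) (ha : a ≠ 0)
    (hc : ¬ PySem.List.count (pre ++ a :: suf) 0 = 0) :
    find_sum_between_nonzero (pre ++ a :: suf) = 0 := by
  have h1 : pyFirstNonzero (pre ++ a :: suf) 0 = some (0 + (pre.length : Int)) := fn_append pre a _ hpre ha 0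
  have h2 : pyFirstNonzero (pre ++ a :: suf).reverse 0 = some (0 + (suf.reverse.length : Int)) := by
    have hr : (pre ++ a :: suf).reverse = suf.reverse ++ a :: pre.reverse := by simp
    rw [hr]; exact fn_append _ a _ (fun x hx => hsuf x (List.mem_reverse.mp hx)) ha 0
  simp only [find_sum_between_nonzero, h1, h2, hc, if_false]
  have e1 : ((0:Int) + ↑pre.length + 1) = ((pre.length + 1 : Nat) : Int) := by push_cast; ring
  have e2 : PySem.List.len (pre ++ a :: suf) - ((0:Int) + ↑suf.reverse.length)
      = ((pre.length + 1 : Nat) : Int) := by simp [PySem.List.len_eq]; ring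
  rw [e1, e2, PySem.List.slice_natCast]
  simp

-- B on a list whose first nonzero is a: value of the full fold
theorem B_decomp (pre rest : List Int) (a : Int) (hpre : ∀ x ∈ pre, x = 0) (ha : a ≠ 0) :
    (pre ++ a :: rest).foldl altStep (0, 0, 0, false, false)
      = (a + rest.sum, addRes 0 rest, pend 0 rest, true, (!pre.isEmpty || rest.any (· == 0))) := by
  rw [List.foldl_append, alt_zeros pre hpre, List.foldl_cons]
  have hstep : altStep (0, 0, 0, false, false || !pre.isEmpty) a
      = (0 + a, 0, 0, true, !pre.isEmpty) := by simp [altStep, ha]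
  rw [hstep, alt_started]
  simp

theorem sawZero_true (pre rest : List Int) (a : Int) (ha : a ≠ 0)
    (hz : (0:Int) ∈ pre ++ a :: rest) : (!pre.isEmpty || rest.any (· == 0)) = true := by
  rcases List.mem_append.mp hz with h | h
  · cases pre with
    | nil => exact absurd h (by simp)
    | cons y ys => simp
  · rcases List.mem_cons.mp h with h' | h'
    · exact absurd h'.symm ha
    · have hany : rest.any (· == 0) = true := List.any_eq_true.mpr ⟨0, h', by simp⟩
      simp [hany]

-- value of B on a list with first nonzero a and at least one zero
theorem B_val (pre rest : List Int) (a : Int) (hpre : ∀ x ∈ pre, x = 0) (ha : a ≠ 0)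
    (hz : (0:Int) ∈ pre ++ a :: rest) :
    find_sum_between_nonzero_alt (pre ++ a :: rest) = addRes 0 rest := by
  unfold find_sum_between_nonzero_alt
  rw [B_decomp pre rest a hpre ha]
  simp [sawZero_true pre rest a ha hz]

theorem count_zero_iff (lst : List Int) : PySem.List.count lst 0 = 0 ↔ (0:Int) ∉ lst := by
  rw [PySem.List.count_eq]
  constructor
  · intro h; exact List.count_eq_zero.mp (by exact_mod_cast h)
  · intro h; exact_mod_cast congrArg (Nat.cast : Nat → Int) (List.count_eq_zero.mpr h)

-- ===== VERDICT (by name: the statement is the Claim_ definition above) =====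
theorem find_sum_between_nonzero_spec : Claim_equal_find_sum_between_nonzero := by
  intro lst _
  unfold Spec_find_sum_between_nonzero
  by_cases hc : PySem.List.count lst 0 = 0
  · -- no zero in lst: A returns sum(lst), B's saw_zero stays false and it returns total
    have hz : (0:Int) ∉ lst := (count_zero_iff lst).mp hc
    have hA : find_sum_between_nonzero lst = lst.sum := by
      unfold find_sum_between_nonzero
      rw [if_pos hc]
    have hsz : (lst.foldl altStep (0, 0, 0, false, false)).2.2.2.2 = false := by
      rw [alt_sawZero]
      simp only [Bool.false_or, List.any_eq_false]
      intro x hx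
      simp only [beq_iff_eq]
      exact fun h => hz (h ▸ hx)
    have hB : find_sum_between_nonzero_alt lst = lst.sum := by
      unfold find_sum_between_nonzero_alt
      simp [hsz, alt_total]
    rw [hA, hB]
  · have h0 : (0:Int) ∈ lst := by
      by_contra h; exact hc ((count_zero_iff lst).mpr h)
    by_cases hnz : ∃ x ∈ lst, x ≠ 0
    · obtain ⟨pre, a, rest, heq, hpre, ha⟩ := exists_first_decomp lst hnz
      subst heq
      by_cases hr : ∃ x ∈ rest, x ≠ 0
      · -- a later nonzero exists: split rest at its last nonzero b
        have hr' : ∃ x ∈ rest.reverse, x ≠ 0 := by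
          obtain ⟨y, hy, hy0⟩ := hr; exact ⟨y, List.mem_reverse.mpr hy, hy0⟩
        obtain ⟨suf', b, rest', heq2, hsuf', hb⟩ := exists_first_decomp rest.reverse hr'
        have hrest : rest = rest'.reverse ++ [b] ++ suf'.reverse := by
          have h' := congrArg List.reverse heq2
          simpa using h'
        rw [hrest] at hc h0 ⊢
        have hsufz : ∀ x ∈ suf'.reverse, x = 0 := fun x hx => hsuf' x (List.mem_reverse.mp hx)
        rw [A_mixed pre rest'.reverse suf'.reverse a b hpre hsufz ha hb hc,
            B_val pre _ a hpre ha h0,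
            addRes_append_zeros (rest'.reverse ++ [b]) suf'.reverse hsufz 0,
            addRes_last_nonzero rest'.reverse b hb 0]
        ring
      · -- everything after a is zero
        have hrz : ∀ x ∈ rest, x = 0 := by
          intro x hx; by_contra hx0; exact hr ⟨x, hx, hx0⟩
        rw [A_onez pre rest a hpre hrz ha hc, B_val pre rest a hpre ha h0,
            addRes_zeros rest hrz 0]
    · -- every element is zero
      have hall : ∀ x ∈ lst, x = 0 := by
        intro x hx; by_contra hx0; exact hnz ⟨x, hx, hx0⟩
      have hA : find_sum_between_nonzero lst = 0 := by
        unfold find_sum_between_nonzero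
        rw [if_neg hc, fn_none lst hall 0,
            fn_none lst.reverse (fun x hx => hall x (List.mem_reverse.mp hx)) 0]
      have hne : lst ≠ [] := List.ne_nil_of_mem h0
      have hB : find_sum_between_nonzero_alt lst = 0 := by
        have hfold := alt_zeros lst hall 0 0 0 false
        unfold find_sum_between_nonzero_alt
        rw [hfold]
        simp
      rw [hA, hB]
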